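-- pv_equiv track=rewrite | github.com/chiralcentre/Kattis | buttonbashing.py | suboptimalBFS
-- ===== SOURCE A (Python) =====
-- from collections import deque
--
-- def suboptimalBFS(n,t,buttons):
--     if t == 0:
--         return 0,0
--     # there are 3600s in an hour
--     visited,frontier = [False for _ in range(3601)],deque([(0,0)]) #right attribute keeps track of number of jumps
--     visited[0] = True
--     minimalPresses,lowestTime = 0,3601
--     while frontier:
--         u,counter = frontier.popleft()
--         for move in buttons:
--             v = u+move
--             if v < 0:
--                 v = 0
--             elif v > 3600:
--                 v = 3600
--             if v >= t and lowestTime > v: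
--                 minimalPresses,lowestTime = counter+1,v
--             if not visited[v]:
--                 visited[v] = True
--                 frontier.append((v,counter+1))
--     return minimalPresses,lowestTime-t
-- ===== SOURCE B (Python) =====
-- def suboptimalBFS(n, t, buttons):
--     # Bellman-Ford-style relaxation over the 3601 clock states: sweep the
--     # states (alternating sweep direction each round), relaxing every button
--     # edge at unit cost, until a fixpoint; then scan upward from t for the
--     # first reachable time.
--     INF = 3602
--     dist = [INF] * 3601
--     dist[0] = 0
--     changed, up = True, True
--     while changed:
--         changed = False
--         for u in (range(3601) if up else range(3600, -1, -1)):
--             du = dist[u]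
--             if du == INF:
--                 continue
--             for move in buttons:
--                 v = u + move
--                 if v < 0:
--                     v = 0
--                 elif v > 3600:
--                     v = 3600
--                 if du + 1 < dist[v]:
--                     dist[v] = du + 1
--                     changed = True
--         up = not up
--     for s in range(max(t, 0), 3601):
--         if dist[s] != INF:
--             return dist[s], s - t
--     return 0, 3601 - t
-- ===== Notes on version B (the rewrite author's own statement) =====
-- stated objective: alternative
-- what changed: B abandons A's FIFO-queue BFS entirely: it computes the distance table by Bellman-Ford-style fixpoint relaxation (repeated full sweeps over the 3601 clock states, alternating sweep direction, relaxing every button edge at unit cost until nothing changes) and then scans upward from t for the first reachable time; the no-reachable-time sentinel (0, 3601-t) is kept.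
-- outside the precondition, e.g. on suboptimalBFS(0, -1, [-1]): A returns (1, 1), B returns (0, 1)
import Mathlib
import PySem

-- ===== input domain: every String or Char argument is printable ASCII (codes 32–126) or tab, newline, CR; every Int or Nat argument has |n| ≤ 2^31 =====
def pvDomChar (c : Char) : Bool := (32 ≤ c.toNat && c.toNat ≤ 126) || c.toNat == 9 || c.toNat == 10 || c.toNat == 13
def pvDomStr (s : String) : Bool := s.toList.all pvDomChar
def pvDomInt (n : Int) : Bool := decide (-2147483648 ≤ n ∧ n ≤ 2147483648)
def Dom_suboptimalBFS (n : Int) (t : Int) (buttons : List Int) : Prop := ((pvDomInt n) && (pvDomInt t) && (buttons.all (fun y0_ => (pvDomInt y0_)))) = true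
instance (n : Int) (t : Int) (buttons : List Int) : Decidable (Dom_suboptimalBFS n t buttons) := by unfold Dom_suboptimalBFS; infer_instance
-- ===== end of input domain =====

-- B replaces A's queue BFS by Bellman-Ford-style fixpoint relaxation over the 3601 clock
-- states followed by an upward scan from t (alternative algorithm, same results); equal on
-- all inputs with t ≥ 0 (Pre_).
-- Shared helper: both Pythons clip u+move into [0,3600] by the same if/elif.
def pvClip (v : Int) : Int := if v < 0 then 0 else if v > 3600 then 3600 else v

-- ===== PORT A =====
-- Python's `visited`, a list of 3601 bools, is modeled as an integer-keyed table with default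
-- False (missing key = False); A only indexes it at clipped values in [0,3600], where this is exact.
-- One body of A's inner `for move in buttons` loop; state = (visited, frontier, (minimalPresses, lowestTime)).
def pvAStep (t u c : Int) (st : Std.HashMap Int Bool × List (Int × Int) × Int × Int) (move : Int) :
    Std.HashMap Int Bool × List (Int × Int) × Int × Int :=
  let vis := st.1
  let v := pvClip (u + move)
  let mplt := if t ≤ v ∧ v < st.2.2.2 then (c + 1, v) else (st.2.2.1, st.2.2.2)
  if vis.getD v false then (vis, st.2.1, mplt)
  else (vis.insert v true, st.2.1 ++ [(v, c + 1)], mplt)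

-- A's `while frontier` loop; fuel only makes the recursion structural — A performs at most 3602
-- iterations (each enqueue first marks an unvisited state among 3601), so fuel 5000 is never exhausted.
def pvALoop (t : Int) (buttons : List Int) :
    Nat → Std.HashMap Int Bool → List (Int × Int) → Int → Int → Int × Int
  | 0, _, _, mp, lt => (mp, lt)
  | _ + 1, _, [], mp, lt => (mp, lt)
  | fuel + 1, vis, (u, c) :: rest, mp, lt =>
      let st := buttons.foldl (pvAStep t u c) (vis, rest, mp, lt)
      pvALoop t buttons fuel st.1 st.2.1 st.2.2.1 st.2.2.2

def suboptimalBFS (n : Int) (t : Int) (buttons : List Int) : Int × Int :=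
  if t = 0 then (0, 0)
  else
    let r := pvALoop t buttons 5000 ((∅ : Std.HashMap Int Bool).insert 0 true) [(0, 0)] 0 3601
    (r.1, r.2 - t)

-- ===== PORT B =====
-- Python's `dist`, a list of 3601 ints initialized to INF = 3602, is modeled as an
-- integer-keyed table with default 3602 (missing key = 3602); B only indexes it at clipped
-- values in [0,3600] and at the sweep/scan indices, where this is exact.
-- One body of B's inner `for move in buttons` loop; state = (dist, changed).
def pvRelaxStep (u du : Int) (st : Std.HashMap Int Int × Bool) (move : Int) :
    Std.HashMap Int Int × Bool :=
  let v := pvClip (u + move)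
  if du + 1 < st.1.getD v 3602 then (st.1.insert v (du + 1), true) else st

-- One body of B's `for u in …` sweep (`du = dist[u]; if du == INF: continue; …`).
def pvSweepCell (buttons : List Int) (st : Std.HashMap Int Int × Bool) (u : Int) :
    Std.HashMap Int Int × Bool :=
  let du := st.1.getD u 3602
  if du = 3602 then st else buttons.foldl (pvRelaxStep u du) st

-- One round of B's `while changed` loop body: `changed = False`, then the directed sweep.
def pvSweep (buttons : List Int) (dist : Std.HashMap Int Int) (up : Bool) :
    Std.HashMap Int Int × Bool :=
  (if up then PySem.List.pyRange 0 3601 1 else PySem.List.pyRange 3600 (-1) (-1)).foldl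
    (pvSweepCell buttons) (dist, false)

-- B's `while changed` loop with `up = not up` after each round; fuel only makes the recursion
-- structural — each round that sets `changed` strictly decreases the sum of the 3601 table
-- entries (each ≤ 3602), so at most 3601*3602 = 12970802 rounds run and the fuel is never exhausted.
def pvRelaxLoop (buttons : List Int) : Nat → Std.HashMap Int Int → Bool → Std.HashMap Int Int
  | 0, dist, _ => dist
  | fuel + 1, dist, up =>
      let st := pvSweep buttons dist up
      if st.2 then pvRelaxLoop buttons fuel st.1 (!up) else st.1

-- B's final `for s in range(max(t,0), 3601)` scan with its sentinel fallback.
def pvBScan (dist : Std.HashMap Int Int) (t : Int) : List Int → Int × Int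
  | [] => (0, 3601 - t)
  | s :: rest =>
      if dist.getD s 3602 ≠ 3602 then (dist.getD s 3602, s - t) else pvBScan dist t rest

def suboptimalBFS_alt (n : Int) (t : Int) (buttons : List Int) : Int × Int :=
  let dist := pvRelaxLoop buttons 12970803 ((∅ : Std.HashMap Int Int).insert 0 0) true
  pvBScan dist t (PySem.List.pyRange (max t 0) 3601 1)

-- ===== PRECONDITION & SPEC =====
-- Pre_ excludes negative target times t < 0, which are outside the problem's natural domain
-- (the Kattis task guarantees t ≥ 1): there A forces at least one button press while B's scan
-- naturally answers zero presses, the clock already showing 0 ≥ t.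
def Pre_suboptimalBFS (n : Int) (t : Int) (buttons : List Int) : Prop := 0 ≤ t
instance (n : Int) (t : Int) (buttons : List Int) : Decidable (Pre_suboptimalBFS n t buttons) := by
  unfold Pre_suboptimalBFS; infer_instance

def pvWitness_suboptimalBFS : Int × Int × List Int := (0, 5, [3])

def Spec_suboptimalBFS (n : Int) (t : Int) (buttons : List Int) (out : Int × Int) : Prop :=
  out = suboptimalBFS_alt n t buttons
instance (n : Int) (t : Int) (buttons : List Int) (out : Int × Int) :
    Decidable (Spec_suboptimalBFS n t buttons out) := by
  unfold Spec_suboptimalBFS; infer_instance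

-- ===== CLAIM (what is proved, stated in full; the proofs are below) =====
def Claim_equal_suboptimalBFS : Prop := ∀ (n : Int) (t : Int) (buttons : List Int),
  Dom_suboptimalBFS n t buttons → Pre_suboptimalBFS n t buttons →
  Spec_suboptimalBFS n t buttons (suboptimalBFS n t buttons)

-- ===== LEMMAS AND PROOFS =====

theorem pvClip_bounds (v : Int) : 0 ≤ pvClip v ∧ pvClip v ≤ 3600 := by
  unfold pvClip; split_ifs <;> omega


-- ---------- A-side ghost: the same BFS with a distance table (proof-only helpers) ----------
-- One ghost step mirroring pvAStep: state = (dist table, queue of bare states).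
def pvQStep (u d : Int) (st : Std.HashMap Int Int × List Int) (move : Int) :
    Std.HashMap Int Int × List Int :=
  let v := pvClip (u + move)
  match st.1[v]? with
  | some _ => st
  | none => (st.1.insert v (d + 1), st.2 ++ [v])

def pvQLoop (buttons : List Int) : Nat → Std.HashMap Int Int → List Int → Std.HashMap Int Int
  | 0, dist, _ => dist
  | _ + 1, dist, [] => dist
  | fuel + 1, dist, u :: rest =>
      let d := dist[u]?.getD 0
      let st := buttons.foldl (pvQStep u d) (dist, rest)
      pvQLoop buttons fuel st.1 st.2

-- The coupling invariant between A's loop state and the ghost state (t ≥ 1).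
def pvInv (t : Int) (vis : Std.HashMap Int Bool) (fr : List (Int × Int)) (mp lt : Int)
    (dist : Std.HashMap Int Int) (q : List Int) : Prop :=
  (∀ x : Int, vis.getD x false = dist[x]?.isSome) ∧
  fr = q.map (fun w => (w, dist[w]?.getD 0)) ∧
  (∀ w ∈ q, dist[w]?.isSome) ∧
  (∀ s : Int, t ≤ s → s < lt → dist[s]? = none) ∧
  ((lt = 3601 ∧ mp = 0) ∨ (t ≤ lt ∧ lt ≤ 3600 ∧ dist[lt]? = some mp))

-- What survives to the end of the loops: A's (mp, lt) names the first set entry of dist ≥ t.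
def pvPost (t : Int) (p : Int × Int) (dist : Std.HashMap Int Int) : Prop :=
  (∀ s : Int, t ≤ s → s < p.2 → dist[s]? = none) ∧
  ((p.2 = 3601 ∧ p.1 = 0) ∨ (t ≤ p.2 ∧ p.2 ≤ 3600 ∧ dist[p.2]? = some p.1))

theorem pvStep_inv (t u c move : Int)
    (vis : Std.HashMap Int Bool) (fr : List (Int × Int)) (mp lt : Int)
    (dist : Std.HashMap Int Int) (q : List Int)
    (h : pvInv t vis fr mp lt dist q) :
    pvInv t (pvAStep t u c (vis, fr, mp, lt) move).1 (pvAStep t u c (vis, fr, mp, lt) move).2.1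
      (pvAStep t u c (vis, fr, mp, lt) move).2.2.1 (pvAStep t u c (vis, fr, mp, lt) move).2.2.2
      (pvQStep u c (dist, q) move).1 (pvQStep u c (dist, q) move).2 := by
  obtain ⟨h1, h2, h3, h4, h5⟩ := h
  have hvb := pvClip_bounds (u + move)
  simp only [pvAStep, pvQStep]
  set v := pvClip (u + move) with hv
  cases hdv : dist[v]? with
  | some dv =>
      have hvis : vis.getD v false = true := by rw [h1, hdv]; rfl
      have hcond : ¬ (t ≤ v ∧ v < lt) := by
        rintro ⟨hc1, hc2⟩
        have := h4 v hc1 hc2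
        rw [this] at hdv; cases hdv
      simp only [hvis, if_true, hcond, if_false]
      exact ⟨h1, h2, h3, h4, h5⟩
  | none =>
      have hvis : vis.getD v false = false := by rw [h1, hdv]; rfl
      simp only [hvis, Bool.false_eq_true, if_false]
      refine ⟨?_, ?_, ?_, ?_, ?_⟩
      · intro x
        by_cases hx : v = x
        · simp [hx]
        · simp only [Std.HashMap.getD_insert, Std.HashMap.getElem?_insert, beq_iff_eq,
            if_neg hx]
          exact h1 x
      · rw [List.map_append, h2]
        congr 1
        · apply List.map_congr_left
          intro w hw
          have hws := h3 w hw
          have hwv : v ≠ w := by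
            intro he; rw [← he, hdv] at hws; cases hws
          simp [Std.HashMap.getElem?_insert, hwv]
        · simp [Std.HashMap.getElem?_insert]
      · intro w hw
        rcases List.mem_append.mp hw with hw | hw
        · by_cases hwv : v = w
          · simp [Std.HashMap.getElem?_insert, hwv]
          · simp only [Std.HashMap.getElem?_insert, beq_iff_eq, if_neg hwv]
            exact h3 w hw
        · simp at hw
          simp [hw]
      · by_cases hc : t ≤ v ∧ v < lt
        · rw [if_pos hc]
          intro s hs1 hs2
          have hsv : v ≠ s := by omega
          simp only [Std.HashMap.getElem?_insert, beq_iff_eq, if_neg hsv]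
          exact h4 s hs1 (by omega)
        · rw [if_neg hc]
          intro s hs1 hs2
          have hsv : v ≠ s := by
            intro he; exact hc ⟨by omega, by omega⟩
          simp only [Std.HashMap.getElem?_insert, beq_iff_eq, if_neg hsv]
          exact h4 s hs1 hs2
      · by_cases hc : t ≤ v ∧ v < lt
        · rw [if_pos hc]
          right
          exact ⟨hc.1, hvb.2, by simp⟩
        · rw [if_neg hc]
          rcases h5 with ⟨l1, l2⟩ | ⟨r1, r2, r3⟩
          · left; exact ⟨l1, l2⟩
          · right
            have hlv : v ≠ lt := by
              intro he; rw [he, r3] at hdv; cases hdv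
            refine ⟨r1, r2, ?_⟩
            simp only [Std.HashMap.getElem?_insert, beq_iff_eq, if_neg hlv]
            exact r3

theorem pvFold_inv (t u c : Int) :
    ∀ (bs : List Int) (vis : Std.HashMap Int Bool) (fr : List (Int × Int)) (mp lt : Int)
      (dist : Std.HashMap Int Int) (q : List Int), pvInv t vis fr mp lt dist q →
    pvInv t (bs.foldl (pvAStep t u c) (vis, fr, mp, lt)).1
      (bs.foldl (pvAStep t u c) (vis, fr, mp, lt)).2.1
      (bs.foldl (pvAStep t u c) (vis, fr, mp, lt)).2.2.1
      (bs.foldl (pvAStep t u c) (vis, fr, mp, lt)).2.2.2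
      (bs.foldl (pvQStep u c) (dist, q)).1 (bs.foldl (pvQStep u c) (dist, q)).2 := by
  intro bs
  induction bs with
  | nil => intro vis fr mp lt dist q h; simpa using h
  | cons b bs ih =>
      intro vis fr mp lt dist q h
      have h1 := pvStep_inv t u c b vis fr mp lt dist q h
      simpa using ih _ _ _ _ _ _ h1

theorem pvLoop_post (t : Int) (buttons : List Int) :
    ∀ (fuel : Nat) (vis : Std.HashMap Int Bool) (fr : List (Int × Int)) (mp lt : Int)
      (dist : Std.HashMap Int Int) (q : List Int), pvInv t vis fr mp lt dist q →
    pvPost t (pvALoop t buttons fuel vis fr mp lt) (pvQLoop buttons fuel dist q) := by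
  intro fuel
  induction fuel with
  | zero =>
      intro vis fr mp lt dist q h
      exact ⟨h.2.2.2.1, h.2.2.2.2⟩
  | succ fuel ih =>
      intro vis fr mp lt dist q h
      obtain ⟨h1, h2, h3, h4, h5⟩ := h
      cases q with
      | nil =>
          simp only [List.map_nil] at h2
          subst h2
          exact ⟨h4, h5⟩
      | cons u rest =>
          simp only [List.map_cons] at h2
          subst h2
          show pvPost t
            (pvALoop t buttons fuel
              ((buttons.foldl (pvAStep t u (dist[u]?.getD 0))
                (vis, List.map (fun w => (w, dist[w]?.getD 0)) rest, mp, lt))).1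
              ((buttons.foldl (pvAStep t u (dist[u]?.getD 0))
                (vis, List.map (fun w => (w, dist[w]?.getD 0)) rest, mp, lt))).2.1
              ((buttons.foldl (pvAStep t u (dist[u]?.getD 0))
                (vis, List.map (fun w => (w, dist[w]?.getD 0)) rest, mp, lt))).2.2.1
              ((buttons.foldl (pvAStep t u (dist[u]?.getD 0))
                (vis, List.map (fun w => (w, dist[w]?.getD 0)) rest, mp, lt))).2.2.2)
            (pvQLoop buttons fuel
              ((buttons.foldl (pvQStep u (dist[u]?.getD 0)) (dist, rest))).1
              ((buttons.foldl (pvQStep u (dist[u]?.getD 0)) (dist, rest))).2)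
          apply ih
          apply pvFold_inv t u (dist[u]?.getD 0)
          exact ⟨h1, rfl, fun w hw => h3 w (List.mem_cons_of_mem u hw), h4, h5⟩

-- ghost-table entries are never overwritten.
theorem pvQFold_mono (u d : Int) (bs : List Int) :
    ∀ (st : Std.HashMap Int Int × List Int) (x y : Int),
    st.1[x]? = some y → (bs.foldl (pvQStep u d) st).1[x]? = some y := by
  induction bs with
  | nil => intro st x y hx; simpa using hx
  | cons b bs ih =>
      intro st x y hx
      apply ih
      unfold pvQStep
      cases hv : st.1[pvClip (u + b)]? with
      | some dv => simpa [hv] using hx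
      | none =>
          have hxv : pvClip (u + b) ≠ x := by
            intro he; rw [he, hx] at hv; cases hv
          simp only [hv]
          simp only [Std.HashMap.getElem?_insert, beq_iff_eq, if_neg hxv]
          exact hx

theorem pvQLoop_mono (buttons : List Int) :
    ∀ (fuel : Nat) (dist : Std.HashMap Int Int) (q : List Int) (x y : Int), dist[x]? = some y →
    (pvQLoop buttons fuel dist q)[x]? = some y := by
  intro fuel
  induction fuel with
  | zero => intro dist q x y hx; simpa [pvQLoop] using hx
  | succ fuel ih =>
      intro dist q x y hx
      cases q with
      | nil => simpa [pvQLoop] using hx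
      | cons u rest =>
          show (pvQLoop buttons fuel
            ((buttons.foldl (pvQStep u (dist[u]?.getD 0)) (dist, rest))).1
            ((buttons.foldl (pvQStep u (dist[u]?.getD 0)) (dist, rest))).2)[x]? = some y
          exact ih _ _ _ _ (pvQFold_mono u (dist[u]?.getD 0) buttons (dist, rest) x y hx)

-- ---------- reachability: paths of button presses from state 0 ----------
inductive pvReach (buttons : List Int) : Nat → Int → Prop
  | zero : pvReach buttons 0 0
  | step {k : Nat} {u m : Int} : pvReach buttons k u → m ∈ buttons →
      pvReach buttons (k + 1) (pvClip (u + m))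

-- ---------- BFS queue invariant: the ghost loop is sound, closed and bounded ----------
-- Bundle carried through one dequeue's button fold; u is the dequeued state, du its distance,
-- K the (ghost) finite key set of the table.
def pvQFB (buttons : List Int) (u du : Int) (dist : Std.HashMap Int Int) (q : List Int)
    (K : Finset Int) : Prop :=
  (∀ x : Int, dist[x]?.isSome = true ↔ x ∈ K) ∧
  (K ⊆ Finset.Icc (0 : Int) 3600) ∧
  (∀ x d : Int, dist[x]? = some d → 0 ≤ d ∧ d + 1 ≤ (K.card : Int) ∧ pvReach buttons d.toNat x) ∧
  (∀ u' ∈ q, dist[u']?.isSome = true) ∧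
  q.Nodup ∧
  (q.map (fun u' => dist[u']?.getD 0)).Pairwise (· ≤ ·) ∧
  dist[u]? = some du ∧
  u ∉ q ∧
  (∀ u' ∈ q, du ≤ dist[u']?.getD 0) ∧
  (∀ x d : Int, dist[x]? = some d → d ≤ du + 1) ∧
  (∀ x d : Int, dist[x]? = some d → x ∉ q → x ≠ u → ∀ m ∈ buttons,
      ∃ d', dist[pvClip (x + m)]? = some d' ∧ d' ≤ d + 1)

-- The whole queue invariant, between dequeues.
def pvQInv (buttons : List Int) (dist : Std.HashMap Int Int) (q : List Int) (K : Finset Int) :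
    Prop :=
  (∀ x : Int, dist[x]?.isSome = true ↔ x ∈ K) ∧
  (K ⊆ Finset.Icc (0 : Int) 3600) ∧
  (∀ x d : Int, dist[x]? = some d → 0 ≤ d ∧ d + 1 ≤ (K.card : Int) ∧ pvReach buttons d.toNat x) ∧
  (∀ u ∈ q, dist[u]?.isSome = true) ∧
  q.Nodup ∧
  (q.map (fun u => dist[u]?.getD 0)).Pairwise (· ≤ ·) ∧
  (∀ u' ∈ q, ∀ x d : Int, dist[x]? = some d → d ≤ dist[u']?.getD 0 + 1) ∧
  (∀ x d : Int, dist[x]? = some d → x ∉ q → ∀ m ∈ buttons,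
      ∃ d', dist[pvClip (x + m)]? = some d' ∧ d' ≤ d + 1)

-- Facts established once the queue loop has drained.
def pvQPost (buttons : List Int) (D : Std.HashMap Int Int) : Prop :=
  (∀ x d : Int, D[x]? = some d → 0 ≤ d ∧ d ≤ 3600 ∧ pvReach buttons d.toNat x) ∧
  (∀ x d : Int, D[x]? = some d → ∀ m ∈ buttons,
      ∃ d', D[pvClip (x + m)]? = some d' ∧ d' ≤ d + 1)

theorem pvQStep_fb (buttons : List Int) (u du m : Int) (hm : m ∈ buttons)
    (dist : Std.HashMap Int Int) (q : List Int) (K : Finset Int)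
    (h : pvQFB buttons u du dist q K) :
    ∃ K' : Finset Int,
      pvQFB buttons u du (pvQStep u du (dist, q) m).1 (pvQStep u du (dist, q) m).2 K' ∧
      K ⊆ K' ∧
      (pvQStep u du (dist, q) m).2.length + K.card = q.length + K'.card ∧
      (∃ d', (pvQStep u du (dist, q) m).1[pvClip (u + m)]? = some d' ∧ d' ≤ du + 1) := by
  obtain ⟨h0, hK, h1, h2, h3, hsort, hu, hun, hlb, hcap, hcl⟩ := h
  have hvb := pvClip_bounds (u + m)
  unfold pvQStep
  cases hv : dist[pvClip (u + m)]? with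
  | some dv =>
      simp only [hv]
      exact ⟨K, ⟨h0, hK, h1, h2, h3, hsort, hu, hun, hlb, hcap, hcl⟩, Finset.Subset.rfl, rfl,
        dv, rfl, hcap _ _ hv⟩
  | none =>
      simp only [hv]
      set v := pvClip (u + m) with hvdef
      have hvK : v ∉ K := by
        intro hmem
        have := (h0 v).mpr hmem
        rw [hv] at this; cases this
      have hvq : v ∉ q := by
        intro hmem
        have := h2 v hmem
        rw [hv] at this; cases this
      have hvu : v ≠ u := by
        intro he; rw [he, hu] at hv; cases hv
      have hcard : (insert v K).card = K.card + 1 := Finset.card_insert_of_notMem hvK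
      have hget : ∀ x : Int, (dist.insert v (du + 1))[x]? = if v = x then some (du + 1)
          else dist[x]? := by
        intro x; simp [Std.HashMap.getElem?_insert]
      have hgetne : ∀ u' ∈ q, (dist.insert v (du + 1))[u']? = dist[u']? := by
        intro u' hmem
        rw [hget]
        have : v ≠ u' := fun he => hvq (he ▸ hmem)
        simp [this]
      have hmapeq : q.map (fun u' => (dist.insert v (du + 1))[u']?.getD 0) =
          q.map (fun u' => dist[u']?.getD 0) := by
        apply List.map_congr_left
        intro u' hmem; rw [hgetne u' hmem]
      have hvalcap : ∀ u' ∈ q, dist[u']?.getD 0 ≤ du + 1 := by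
        intro u' hmem
        obtain ⟨d', hd'⟩ := Option.isSome_iff_exists.mp (h2 u' hmem)
        rw [hd']
        simpa using hcap _ _ hd'
      obtain ⟨hdu0, hducard, hreach⟩ := h1 u du hu
      refine ⟨insert v K, ⟨?_, ?_, ?_, ?_, ?_, ?_, ?_, ?_, ?_, ?_, ?_⟩, ?_, ?_, ?_⟩
      · intro x
        rw [hget]
        by_cases hx : v = x
        · simp [hx]
        · simp only [if_neg hx]
          rw [h0]
          constructor
          · exact fun h => Finset.mem_insert_of_mem h
          · intro h
            rcases Finset.mem_insert.mp h with he | h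
            · exact (hx he.symm).elim
            · exact h
      · intro x hx
        rcases Finset.mem_insert.mp hx with h | h
        · subst h; simp [Finset.mem_Icc]; omega
        · exact hK h
      · intro x d hx
        rw [hget] at hx
        by_cases hxv : v = x
        · rw [if_pos hxv] at hx
          injection hx with hx'
          subst hx'
          refine ⟨by omega, by rw [hcard]; push_cast; omega, ?_⟩
          have : (du + 1).toNat = du.toNat + 1 := by omega
          rw [this, ← hxv]
          exact pvReach.step (h1 u du hu).2.2 hm
        · rw [if_neg hxv] at hx
          obtain ⟨c1, c2, c3⟩ := h1 x d hx
          exact ⟨c1, by rw [hcard]; push_cast at *; omega, c3⟩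
      · intro u' hmem
        rcases List.mem_append.mp hmem with hmem | hmem
        · rw [hgetne u' hmem]; exact h2 u' hmem
        · simp at hmem; subst hmem; rw [hget]; simp
      · rw [List.nodup_append]
        refine ⟨h3, List.nodup_singleton v, ?_⟩
        intro a ha
        simp only [List.mem_singleton]
        intro b hb
        subst hb
        intro heq
        exact hvq (by rw [← heq]; exact ha)
      · rw [List.map_append, List.pairwise_append]
        refine ⟨by rw [hmapeq]; exact hsort, by simp, ?_⟩
        intro a ha b hb
        simp only [List.map_singleton, List.mem_singleton] at hb
        rw [hmapeq] at ha
        obtain ⟨u', hu', he⟩ := List.mem_map.mp ha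
        subst hb he
        rw [hget]
        simp only [Option.getD_some]
        exact hvalcap u' hu'
      · rw [hget, if_neg hvu]; exact hu
      · intro hmem
        rcases List.mem_append.mp hmem with hmem | hmem
        · exact hun hmem
        · simp at hmem; exact hvu hmem.symm
      · intro u' hmem
        rcases List.mem_append.mp hmem with hmem | hmem
        · rw [hgetne u' hmem]; exact hlb u' hmem
        · simp at hmem; subst hmem; rw [hget]; simp
      · intro x d hx
        rw [hget] at hx
        by_cases hxv : v = x
        · rw [if_pos hxv] at hx; injection hx with hx'; omega
        · rw [if_neg hxv] at hx; exact hcap _ _ hx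
      · intro x d hx hxq hxu m' hm'
        rw [hget] at hx
        by_cases hxv : v = x
        · exact absurd (List.mem_append.mpr (Or.inr (by simp [hxv]))) hxq
        · rw [if_neg hxv] at hx
          have hxq' : x ∉ q := fun hc => hxq (List.mem_append.mpr (Or.inl hc))
          obtain ⟨d', hd', hled⟩ := hcl x d hx hxq' hxu m' hm'
          refine ⟨d', ?_, hled⟩
          rw [hget]
          have : v ≠ pvClip (x + m') := by
            intro he; rw [← he, hv] at hd'; cases hd'
          rw [if_neg this]
          exact hd'
      · exact Finset.subset_insert _ _
      · simp only [List.length_append, List.length_singleton, hcard]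
        omega
      · exact ⟨du + 1, by rw [hget]; simp, le_refl _⟩

theorem pvQFold_fb (buttons : List Int) (u du : Int) :
    ∀ (bs : List Int), (∀ m ∈ bs, m ∈ buttons) →
    ∀ (dist : Std.HashMap Int Int) (q : List Int) (K : Finset Int),
    pvQFB buttons u du dist q K →
    ∃ K' : Finset Int,
      pvQFB buttons u du (bs.foldl (pvQStep u du) (dist, q)).1
        (bs.foldl (pvQStep u du) (dist, q)).2 K' ∧
      K ⊆ K' ∧
      (bs.foldl (pvQStep u du) (dist, q)).2.length + K.card = q.length + K'.card ∧
      (∀ m ∈ bs, ∃ d', (bs.foldl (pvQStep u du) (dist, q)).1[pvClip (u + m)]? = some d' ∧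
          d' ≤ du + 1) := by
  intro bs
  induction bs with
  | nil =>
      intro _ dist q K h
      exact ⟨K, h, Finset.Subset.rfl, rfl, by simp⟩
  | cons m bs ih =>
      intro hsub dist q K h
      have hm : m ∈ buttons := hsub m (List.mem_cons_self)
      obtain ⟨K₁, h₁, hK₁, hlen₁, d₁, hd₁, hdle₁⟩ := pvQStep_fb buttons u du m hm dist q K h
      obtain ⟨K', h', hK', hlen', hms⟩ := ih (fun m' hm' => hsub m' (List.mem_cons_of_mem m hm'))
        (pvQStep u du (dist, q) m).1 (pvQStep u du (dist, q) m).2 K₁ h₁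
      rw [List.foldl_cons]
      have hlen'' : (bs.foldl (pvQStep u du) (pvQStep u du (dist, q) m)).2.length + K₁.card =
          (pvQStep u du (dist, q) m).2.length + K'.card := hlen'
      refine ⟨K', h', hK₁.trans hK', by omega, ?_⟩
      · intro m' hm'
        rcases List.mem_cons.mp hm' with he | hmem
        · rw [he]
          exact ⟨d₁, pvQFold_mono u du bs (pvQStep u du (dist, q) m) _ _ hd₁, hdle₁⟩
        · exact hms m' hmem

theorem pvQLoop_post (buttons : List Int) :
    ∀ (fuel : Nat) (dist : Std.HashMap Int Int) (q : List Int) (K : Finset Int),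
    pvQInv buttons dist q K → q.length + (3601 - K.card) ≤ fuel →
    pvQPost buttons (pvQLoop buttons fuel dist q) := by
  have hKcard : ∀ K : Finset Int, K ⊆ Finset.Icc (0 : Int) 3600 → K.card ≤ 3601 := by
    intro K hK
    have h := Finset.card_le_card hK
    rw [Int.card_Icc] at h
    omega
  have hdrained : ∀ (dist : Std.HashMap Int Int) (K : Finset Int),
      pvQInv buttons dist [] K → pvQPost buttons dist := by
    intro dist K ⟨h0, hK, h1, _, _, _, _, hcl⟩
    constructor
    · intro x d hx
      obtain ⟨c1, c2, c3⟩ := h1 x d hx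
      have := hKcard K hK
      exact ⟨c1, by omega, c3⟩
    · intro x d hx m hm
      exact hcl x d hx (by simp) m hm
  intro fuel
  induction fuel with
  | zero =>
      intro dist q K hinv hfuel
      have hq : q = [] := by
        cases q with
        | nil => rfl
        | cons a l => simp at hfuel
      subst hq
      exact hdrained dist K hinv
  | succ fuel ih =>
      intro dist q K hinv hfuel
      cases q with
      | nil => exact hdrained dist K hinv
      | cons u rest =>
          obtain ⟨h0, hK, h1, h2, h3, hsort, h5, h6⟩ := hinv
          obtain ⟨du, hdu⟩ := Option.isSome_iff_exists.mp (h2 u List.mem_cons_self)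
          have hduD : dist[u]?.getD 0 = du := by rw [hdu]; rfl
          obtain ⟨c1, c2, c3⟩ := h1 u du hdu
          have hfb : pvQFB buttons u du dist rest K := by
            refine ⟨h0, hK, h1, fun u' hm => h2 u' (List.mem_cons_of_mem u hm),
              (List.nodup_cons.mp h3).2, ?_, hdu, (List.nodup_cons.mp h3).1, ?_, ?_, ?_⟩
            · have := hsort
              rw [List.map_cons] at this
              exact (List.pairwise_cons.mp this).2
            · intro u' hm
              have := hsort
              rw [List.map_cons] at this
              have := (List.pairwise_cons.mp this).1 _ (List.mem_map_of_mem hm)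
              rw [hduD] at this
              exact this
            · intro x d hx
              have := h5 u List.mem_cons_self x d hx
              rw [hduD] at this
              exact this
            · intro x d hx hxr hxu m hm
              exact h6 x d hx (by simp [hxr, hxu]) m hm
          obtain ⟨K', hfb', hKK', hlen, hms⟩ :=
            pvQFold_fb buttons u du buttons (fun m hm => hm) dist rest K hfb
          obtain ⟨g0, gK, g1, g2, g3, gsort, gu, gun, glb, gcap, gcl⟩ := hfb'
          show pvQPost buttons (pvQLoop buttons fuel
            (buttons.foldl (pvQStep u (dist[u]?.getD 0)) (dist, rest)).1
            (buttons.foldl (pvQStep u (dist[u]?.getD 0)) (dist, rest)).2)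
          rw [hduD]
          apply ih _ _ K'
          · refine ⟨g0, gK, g1, g2, g3, gsort, ?_, ?_⟩
            · intro u' hm x d hx
              have h1' := gcap x d hx
              have h2' := glb u' hm
              omega
            · intro x d hx hxq m hm
              by_cases hxu : x = u
              · subst hxu
                have : d = du := by
                  rw [gu] at hx
                  exact (Option.some.inj hx).symm
                subst this
                exact hms m hm
              · exact gcl x d hx hxq hxu m hm
          · have hc1 : K.card ≤ 3601 := hKcard K hK
            have hc2 : K'.card ≤ 3601 := hKcard K' gK
            have hc3 : K.card ≤ K'.card := Finset.card_le_card hKK'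
            simp only [List.length_cons] at hfuel
            omega

-- BFS completeness: everything reachable in k presses gets a table entry ≤ k.
theorem pvQ_complete (buttons : List Int) (D : Std.HashMap Int Int)
    (h0 : D[(0 : Int)]? = some 0) (hcl : pvQPost buttons D) :
    ∀ (k : Nat) (v : Int), pvReach buttons k v → ∃ d : Int, D[v]? = some d ∧ d ≤ (k : Int) := by
  intro k v h
  induction h with
  | zero => exact ⟨0, h0, by simp⟩
  | @step k' u m hr hm ih =>
      obtain ⟨d, hd, hle⟩ := ih
      obtain ⟨d', hd', hle'⟩ := hcl.2 u d hd m hm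
      exact ⟨d', hd', by push_cast; omega⟩

-- ---------- relaxation invariant: the fixpoint loop is sound and reaches a fixpoint ----------
def pvG (dist : Std.HashMap Int Int) (x : Int) : Int := dist.getD x 3602

def pvFInv (buttons : List Int) (dist : Std.HashMap Int Int) : Prop :=
  (∀ x d : Int, dist[x]? = some d →
      0 ≤ d ∧ d ≤ 3601 ∧ 0 ≤ x ∧ x ≤ 3600 ∧ pvReach buttons d.toNat x) ∧
  dist[(0 : Int)]? = some 0

def pvFix (buttons : List Int) (dist : Std.HashMap Int Int) : Prop :=
  ∀ u : Int, pvG dist u ≠ 3602 → ∀ m ∈ buttons,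
    pvG dist (pvClip (u + m)) ≤ pvG dist u + 1

def pvPhi (dist : Std.HashMap Int Int) : Nat :=
  ∑ i ∈ Finset.range 3601, (pvG dist (i : Int)).toNat

theorem pvG_eq (dist : Std.HashMap Int Int) (x : Int) : pvG dist x = (dist[x]?).getD 3602 :=
  Std.HashMap.getD_eq_getD_getElem?

theorem pvG_some (dist : Std.HashMap Int Int) (x d : Int) (h : dist[x]? = some d) :
    pvG dist x = d := by rw [pvG_eq, h]; rfl

theorem pvG_none (dist : Std.HashMap Int Int) (x : Int) (h : dist[x]? = none) :
    pvG dist x = 3602 := by rw [pvG_eq, h]; rfl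

theorem pvG_ne (dist : Std.HashMap Int Int) (x : Int) (h : pvG dist x ≠ 3602) :
    dist[x]? = some (pvG dist x) := by
  cases hx : dist[x]? with
  | some d => rw [pvG_some dist x d hx]
  | none => exact absurd (pvG_none dist x hx) h

theorem pvG_insert (dist : Std.HashMap Int Int) (v a x : Int) :
    pvG (dist.insert v a) x = if v = x then a else pvG dist x := by
  rw [pvG_eq, pvG_eq]
  simp only [Std.HashMap.getElem?_insert, beq_iff_eq]
  by_cases h : v = x <;> simp [h]

theorem pvG_bounds (buttons : List Int) (dist : Std.HashMap Int Int)
    (hinv : pvFInv buttons dist) (x : Int) : 0 ≤ pvG dist x ∧ pvG dist x ≤ 3602 := by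
  cases hx : dist[x]? with
  | some d =>
      have := (hinv.1 x d hx)
      rw [pvG_some dist x d hx]
      omega
  | none => rw [pvG_none dist x hx]; omega

theorem pvPhi_mono (d' d : Std.HashMap Int Int) (h : ∀ x : Int, pvG d' x ≤ pvG d x) :
    pvPhi d' ≤ pvPhi d :=
  Finset.sum_le_sum fun i _ => Int.toNat_le_toNat (h (i : Int))

theorem pvPhi_strict (d' d : Std.HashMap Int Int) (h : ∀ x : Int, pvG d' x ≤ pvG d x)
    (v : Int) (hv0 : 0 ≤ v) (hv36 : v ≤ 3600) (hnn : 0 ≤ pvG d' v)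
    (hlt : pvG d' v < pvG d v) : pvPhi d' < pvPhi d := by
  unfold pvPhi
  have hle : ∀ i ∈ Finset.range 3601, (pvG d' (i : Int)).toNat ≤ (pvG d (i : Int)).toNat :=
    fun i _ => Int.toNat_le_toNat (h (i : Int))
  have hmem : v.toNat ∈ Finset.range 3601 := Finset.mem_range.mpr (by omega)
  have hstrict : (pvG d' ((v.toNat : Nat) : Int)).toNat < (pvG d ((v.toNat : Nat) : Int)).toNat := by
    rw [Int.toNat_of_nonneg hv0]
    omega
  exact Finset.sum_lt_sum hle ⟨v.toNat, hmem, hstrict⟩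

theorem pvRelaxStep_facts (buttons : List Int) (u du m : Int) (hm : m ∈ buttons)
    (hreach : pvReach buttons du.toNat u) (hdu0 : 0 ≤ du)
    (st : Std.HashMap Int Int × Bool) (hinv : pvFInv buttons st.1) :
    pvFInv buttons (pvRelaxStep u du st m).1 ∧
    (∀ x : Int, pvG (pvRelaxStep u du st m).1 x ≤ pvG st.1 x) ∧
    ((pvRelaxStep u du st m).2 = st.2 ∨
      ((pvRelaxStep u du st m).2 = true ∧ pvPhi (pvRelaxStep u du st m).1 < pvPhi st.1)) := by
  have hvb := pvClip_bounds (u + m)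
  unfold pvRelaxStep
  by_cases hc : du + 1 < st.1.getD (pvClip (u + m)) 3602
  · rw [if_pos hc]
    have hcG : du + 1 < pvG st.1 (pvClip (u + m)) := hc
    have hGle := (pvG_bounds buttons st.1 hinv (pvClip (u + m))).2
    have hv0 : pvClip (u + m) ≠ 0 := by
      intro he
      have h0 : pvG st.1 (pvClip (u + m)) = 0 := by
        rw [he]; exact pvG_some st.1 0 0 hinv.2
      omega
    refine ⟨⟨?_, ?_⟩, ?_, ?_⟩
    · intro x d hx
      simp only [Std.HashMap.getElem?_insert, beq_iff_eq] at hx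
      by_cases hxv : pvClip (u + m) = x
      · rw [if_pos hxv] at hx
        injection hx with hx'
        subst hx'
        refine ⟨by omega, by omega, by omega, by omega, ?_⟩
        have : (du + 1).toNat = du.toNat + 1 := by omega
        rw [this, ← hxv]
        exact pvReach.step hreach hm
      · rw [if_neg hxv] at hx
        exact hinv.1 x d hx
    · simp only [Std.HashMap.getElem?_insert, beq_iff_eq, if_neg hv0]
      exact hinv.2
    · intro x
      rw [pvG_insert]
      by_cases hxv : pvClip (u + m) = x
      · rw [if_pos hxv, ← hxv]; omega
      · rw [if_neg hxv]
    · right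
      refine ⟨rfl, pvPhi_strict _ _ ?_ (pvClip (u + m)) hvb.1 hvb.2 ?_ ?_⟩
      · intro x
        rw [pvG_insert]
        by_cases hxv : pvClip (u + m) = x
        · rw [if_pos hxv, ← hxv]; omega
        · rw [if_neg hxv]
      · rw [pvG_insert, if_pos rfl]; omega
      · rw [pvG_insert, if_pos rfl]; omega
  · rw [if_neg hc]
    exact ⟨hinv, fun x => le_refl _, Or.inl rfl⟩

theorem pvFoldFacts {α : Type} (buttons : List Int)
    (step : Std.HashMap Int Int × Bool → α → Std.HashMap Int Int × Bool) :
    ∀ (l : List α),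
    (∀ (st : Std.HashMap Int Int × Bool), ∀ a ∈ l, pvFInv buttons st.1 →
      pvFInv buttons (step st a).1 ∧ (∀ x : Int, pvG (step st a).1 x ≤ pvG st.1 x) ∧
      ((step st a).2 = st.2 ∨ ((step st a).2 = true ∧ pvPhi (step st a).1 < pvPhi st.1))) →
    ∀ (st : Std.HashMap Int Int × Bool), pvFInv buttons st.1 →
      pvFInv buttons (l.foldl step st).1 ∧
      (∀ x : Int, pvG (l.foldl step st).1 x ≤ pvG st.1 x) ∧
      ((l.foldl step st).2 = st.2 ∨
        ((l.foldl step st).2 = true ∧ pvPhi (l.foldl step st).1 < pvPhi st.1)) := by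
  intro l
  induction l with
  | nil => intro _ st h1; exact ⟨h1, fun x => le_refl _, Or.inl rfl⟩
  | cons a l ih =>
      intro h st h1
      obtain ⟨s1, s2, s3⟩ := h st a List.mem_cons_self h1
      obtain ⟨f1, f2, f3⟩ := ih (fun st' a' ha' h1' => h st' a' (List.mem_cons_of_mem a ha') h1')
        (step st a) s1
      rw [List.foldl_cons]
      refine ⟨f1, fun x => (f2 x).trans (s2 x), ?_⟩
      rcases f3 with heq | ⟨ht, hp⟩
      · rcases s3 with heq2 | ⟨ht2, hp2⟩
        · exact Or.inl (heq.trans heq2)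
        · exact Or.inr ⟨heq.trans ht2, lt_of_le_of_lt (pvPhi_mono _ _ f2) hp2⟩
      · exact Or.inr ⟨ht, lt_of_lt_of_le hp (pvPhi_mono _ _ s2)⟩

theorem pvSweepCell_facts (buttons : List Int) (u : Int)
    (st : Std.HashMap Int Int × Bool) (hinv : pvFInv buttons st.1) :
    pvFInv buttons (pvSweepCell buttons st u).1 ∧
    (∀ x : Int, pvG (pvSweepCell buttons st u).1 x ≤ pvG st.1 x) ∧
    ((pvSweepCell buttons st u).2 = st.2 ∨
      ((pvSweepCell buttons st u).2 = true ∧ pvPhi (pvSweepCell buttons st u).1 < pvPhi st.1)) := by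
  unfold pvSweepCell
  by_cases hdu : st.1.getD u 3602 = 3602
  · rw [if_pos hdu]
    exact ⟨hinv, fun x => le_refl _, Or.inl rfl⟩
  · rw [if_neg hdu]
    have hentry : st.1[u]? = some (pvG st.1 u) := pvG_ne st.1 u hdu
    obtain ⟨c1, c2, c3, c4, c5⟩ := hinv.1 u (pvG st.1 u) hentry
    exact pvFoldFacts buttons (pvRelaxStep u (st.1.getD u 3602)) buttons
      (fun st' m hm h1 => pvRelaxStep_facts buttons u (st.1.getD u 3602) m hm c5 c1 st' h1)
      st hinv

theorem pvSweep_facts (buttons : List Int) (dist : Std.HashMap Int Int) (up : Bool)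
    (hinv : pvFInv buttons dist) :
    pvFInv buttons (pvSweep buttons dist up).1 ∧
    (∀ x : Int, pvG (pvSweep buttons dist up).1 x ≤ pvG dist x) ∧
    ((pvSweep buttons dist up).2 = false ∨
      ((pvSweep buttons dist up).2 = true ∧ pvPhi (pvSweep buttons dist up).1 < pvPhi dist)) := by
  unfold pvSweep
  exact pvFoldFacts buttons (pvSweepCell buttons) _
    (fun st u _ h1 => pvSweepCell_facts buttons u st h1) (dist, false) hinv

theorem pvFoldTrue {α : Type} (step : Std.HashMap Int Int × Bool → α → Std.HashMap Int Int × Bool)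
    (hstep : ∀ (st : Std.HashMap Int Int × Bool) (a : α), st.2 = true → (step st a).2 = true) :
    ∀ (l : List α) (st : Std.HashMap Int Int × Bool), st.2 = true →
      (l.foldl step st).2 = true := by
  intro l
  induction l with
  | nil => intro st h; exact h
  | cons a l ih => intro st h; rw [List.foldl_cons]; exact ih _ (hstep st a h)

theorem pvRelaxStep_true (u du m : Int) (st : Std.HashMap Int Int × Bool) (h : st.2 = true) :
    (pvRelaxStep u du st m).2 = true := by
  unfold pvRelaxStep
  by_cases hc : du + 1 < st.1.getD (pvClip (u + m)) 3602
  · rw [if_pos hc]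
  · rw [if_neg hc]; exact h

theorem pvSweepCell_true (buttons : List Int) (u : Int) (st : Std.HashMap Int Int × Bool)
    (h : st.2 = true) : (pvSweepCell buttons st u).2 = true := by
  unfold pvSweepCell
  by_cases hdu : st.1.getD u 3602 = 3602
  · rw [if_pos hdu]; exact h
  · rw [if_neg hdu]
    exact pvFoldTrue _ (fun st' m => pvRelaxStep_true u (st.1.getD u 3602) m st') buttons st h

theorem pvFoldNoChange {α : Type}
    (step : Std.HashMap Int Int × Bool → α → Std.HashMap Int Int × Bool)
    (Q : Std.HashMap Int Int → α → Prop)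
    (hstep : ∀ (st : Std.HashMap Int Int × Bool) (a : α), st.2 = false →
        (step st a).2 = false → step st a = st ∧ Q st.1 a)
    (htrue : ∀ (st : Std.HashMap Int Int × Bool) (a : α), st.2 = true → (step st a).2 = true) :
    ∀ (l : List α) (st : Std.HashMap Int Int × Bool), st.2 = false →
      (l.foldl step st).2 = false → (l.foldl step st).1 = st.1 ∧ ∀ a ∈ l, Q st.1 a := by
  intro l
  induction l with
  | nil => intro st _ _; exact ⟨rfl, by simp⟩
  | cons a l ih =>
      intro st h0 hfin
      rw [List.foldl_cons] at hfin ⊢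
      by_cases hfl : (step st a).2 = false
      · obtain ⟨heq, hQ⟩ := hstep st a h0 hfl
        rw [heq] at hfin ⊢
        obtain ⟨ih1, ih2⟩ := ih st h0 hfin
        refine ⟨ih1, ?_⟩
        intro a' ha'
        rcases List.mem_cons.mp ha' with he | hmem
        · exact he ▸ hQ
        · exact ih2 a' hmem
      · exfalso
        have : (step st a).2 = true := by
          cases hx : (step st a).2
          · exact absurd hx hfl
          · rfl
        have := pvFoldTrue step htrue l (step st a) this
        rw [this] at hfin
        cases hfin

-- the per-cell fact extracted from a sweep that changed nothing
def pvQCell (buttons : List Int) (dist : Std.HashMap Int Int) (u : Int) : Prop :=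
  pvG dist u ≠ 3602 → ∀ m ∈ buttons, pvG dist (pvClip (u + m)) ≤ pvG dist u + 1

theorem pvRelaxStep_nochange (u du m : Int) (st : Std.HashMap Int Int × Bool)
    (h0 : st.2 = false) (h1 : (pvRelaxStep u du st m).2 = false) :
    pvRelaxStep u du st m = st ∧ ¬ (du + 1 < pvG st.1 (pvClip (u + m))) := by
  unfold pvRelaxStep at h1 ⊢
  by_cases hc : du + 1 < st.1.getD (pvClip (u + m)) 3602
  · rw [if_pos hc] at h1
    cases h1
  · rw [if_neg hc]
    exact ⟨rfl, hc⟩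

theorem pvSweepCell_nochange (buttons : List Int) (u : Int) (st : Std.HashMap Int Int × Bool)
    (h0 : st.2 = false) (h1 : (pvSweepCell buttons st u).2 = false) :
    pvSweepCell buttons st u = st ∧ pvQCell buttons st.1 u := by
  unfold pvSweepCell at h1 ⊢
  by_cases hdu : st.1.getD u 3602 = 3602
  · rw [if_pos hdu] at h1 ⊢
    refine ⟨rfl, ?_⟩
    intro hne
    exact absurd hdu hne
  · rw [if_neg hdu] at h1 ⊢
    obtain ⟨heq, hall⟩ := pvFoldNoChange (pvRelaxStep u (st.1.getD u 3602))
      (fun dist m => ¬ (st.1.getD u 3602 + 1 < pvG dist (pvClip (u + m))))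
      (fun st' m ha hb => pvRelaxStep_nochange u (st.1.getD u 3602) m st' ha hb)
      (fun st' m => pvRelaxStep_true u (st.1.getD u 3602) m st') buttons st h0 h1
    constructor
    · have h2 : (buttons.foldl (pvRelaxStep u (st.1.getD u 3602)) st).2 = st.2 := by
        rw [h1, h0]
      exact Prod.ext heq h2
    · intro _ m hm
      have := hall m hm
      have hg : pvG st.1 u = st.1.getD u 3602 := rfl
      rw [hg]
      omega

theorem pvSweep_nochange (buttons : List Int) (dist : Std.HashMap Int Int) (up : Bool)
    (h1 : (pvSweep buttons dist up).2 = false) :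
    (pvSweep buttons dist up).1 = dist ∧
    ∀ u : Int, 0 ≤ u → u ≤ 3600 → pvQCell buttons dist u := by
  unfold pvSweep at h1 ⊢
  obtain ⟨heq, hall⟩ := pvFoldNoChange (pvSweepCell buttons) (pvQCell buttons)
    (fun st u ha hb => pvSweepCell_nochange buttons u st ha hb)
    (fun st u => pvSweepCell_true buttons u st) _ (dist, false) rfl h1
  refine ⟨heq, ?_⟩
  intro u hu0 hu36
  apply hall
  cases up with
  | true =>
      have he : (if (true : Bool) then PySem.List.pyRange 0 3601 1
          else PySem.List.pyRange 3600 (-1) (-1)) = PySem.List.pyRange 0 3601 1 := rfl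
      rw [he, PySem.List.mem_pyRange_one]
      omega
  | false =>
      have he : (if (false : Bool) then PySem.List.pyRange 0 3601 1
          else PySem.List.pyRange 3600 (-1) (-1)) = PySem.List.pyRange 3600 (-1) (-1) := rfl
      rw [he, PySem.List.mem_pyRange_neg_one]
      omega

theorem pvRelaxLoop_post (buttons : List Int) :
    ∀ (fuel : Nat) (dist : Std.HashMap Int Int) (up : Bool),
    pvFInv buttons dist → pvPhi dist < fuel →
    pvFInv buttons (pvRelaxLoop buttons fuel dist up) ∧
    pvFix buttons (pvRelaxLoop buttons fuel dist up) := by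
  intro fuel
  induction fuel with
  | zero => intro dist up _ hphi; omega
  | succ fuel ih =>
      intro dist up hinv hphi
      obtain ⟨s1, s2, s3⟩ := pvSweep_facts buttons dist up hinv
      have hred : pvRelaxLoop buttons (fuel + 1) dist up =
          if (pvSweep buttons dist up).2 then
            pvRelaxLoop buttons fuel (pvSweep buttons dist up).1 (!up)
          else (pvSweep buttons dist up).1 := rfl
      rw [hred]
      cases hflag : (pvSweep buttons dist up).2 with
      | true =>
          rw [if_pos rfl]
          apply ih _ (!up) s1
          rcases s3 with hfalse | ⟨_, hstrict⟩
          · rw [hflag] at hfalse; cases hfalse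
          · omega
      | false =>
          rw [if_neg (by simp)]
          obtain ⟨heq, hcells⟩ := pvSweep_nochange buttons dist up hflag
          rw [heq]
          refine ⟨hinv, ?_⟩
          intro u hu m hm
          have hentry := pvG_ne dist u hu
          obtain ⟨_, _, hx0, hx36, _⟩ := hinv.1 u (pvG dist u) hentry
          exact hcells u hx0 hx36 hu m hm

-- relaxation completeness: everything reachable in k presses gets table value ≤ min k 3602.
theorem pvF_complete (buttons : List Int) (F : Std.HashMap Int Int)
    (hinv : pvFInv buttons F) (hfix : pvFix buttons F) :
    ∀ (k : Nat) (v : Int), pvReach buttons k v → pvG F v ≤ min (k : Int) 3602 := by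
  intro k v h
  induction h with
  | zero =>
      have := pvG_some F 0 0 hinv.2
      simp [this]
  | @step k' u m hr hm ih =>
      have hGv := (pvG_bounds buttons F hinv (pvClip (u + m))).2
      by_cases hu : pvG F u = 3602
      · rw [hu] at ih
        push_cast
        omega
      · have := hfix u hu m hm
        push_cast
        omega

-- ---------- the two final tables agree ----------
theorem pvCorr (buttons : List Int) (D F : Std.HashMap Int Int)
    (hD0 : D[(0 : Int)]? = some 0) (hDpost : pvQPost buttons D)
    (hFinv : pvFInv buttons F) (hFfix : pvFix buttons F) :
    ∀ v : Int, (∀ d : Int, D[v]? = some d → pvG F v = d) ∧ (D[v]? = none → pvG F v = 3602) := by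
  intro v
  constructor
  · intro d hDv
    obtain ⟨hd0, hd36, hreach⟩ := hDpost.1 v d hDv
    have hFle := pvF_complete buttons F hFinv hFfix d.toNat v hreach
    rw [Int.toNat_of_nonneg hd0] at hFle
    have hne : pvG F v ≠ 3602 := by omega
    have hFv := pvG_ne F v hne
    obtain ⟨he0, _, _, _, hereach⟩ := hFinv.1 v (pvG F v) hFv
    obtain ⟨d'', hd'', hle''⟩ := pvQ_complete buttons D hD0 hDpost (pvG F v).toNat v hereach
    rw [hDv] at hd''
    have : d = d'' := Option.some.inj hd''
    rw [Int.toNat_of_nonneg he0] at hle''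
    omega
  · intro hnone
    by_contra hne
    have hFv := pvG_ne F v hne
    obtain ⟨he0, _, _, _, hereach⟩ := hFinv.1 v (pvG F v) hFv
    obtain ⟨d'', hd'', _⟩ := pvQ_complete buttons D hD0 hDpost (pvG F v).toNat v hereach
    rw [hnone] at hd''
    cases hd''

-- ---------- the final scan reads off A's answer ----------
theorem pvScan_eq (buttons : List Int) (t mp lt : Int) (F D : Std.HashMap Int Int)
    (ht : 1 ≤ t)
    (hpost1 : ∀ s : Int, t ≤ s → s < lt → D[s]? = none)
    (hpost2 : (lt = 3601 ∧ mp = 0) ∨ (t ≤ lt ∧ lt ≤ 3600 ∧ D[lt]? = some mp))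
    (hcorr : ∀ v : Int, (∀ d : Int, D[v]? = some d → pvG F v = d) ∧
        (D[v]? = none → pvG F v = 3602))
    (hsound : ∀ x d : Int, D[x]? = some d → d ≤ 3600) :
    ∀ (k : Nat) (a : Int), t ≤ a → a ≤ lt → 3601 ≤ a + k →
    pvBScan F t (PySem.List.pyRange a 3601 1) = (mp, lt - t) := by
  have hend : ∀ a : Int, 3601 ≤ a → pvBScan F t (PySem.List.pyRange a 3601 1) = (0, 3601 - t) := by
    intro a ha
    rw [PySem.List.pyRange_one_eq_nil (by omega)]
    rfl
  intro k
  induction k with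
  | zero =>
      intro a h1 h2 h3
      rw [hend a (by omega)]
      rcases hpost2 with ⟨e1, e2⟩ | ⟨r1, r2, r3⟩
      · rw [e1, e2]
      · omega
  | succ k ih =>
      intro a h1 h2 h3
      by_cases ha : 3601 ≤ a
      · rw [hend a ha]
        rcases hpost2 with ⟨e1, e2⟩ | ⟨r1, r2, r3⟩
        · rw [e1, e2]
        · omega
      · rw [PySem.List.pyRange_one_cons (by omega)]
        by_cases hal : a = lt
        · rcases hpost2 with ⟨e1, e2⟩ | ⟨r1, r2, r3⟩
          · omega
          · subst hal
            have hG : pvG F a = mp := (hcorr a).1 mp r3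
            have hmp : mp ≤ 3600 := hsound a mp r3
            have hGd : F.getD a 3602 = mp := hG
            simp only [pvBScan, hGd]
            rw [if_pos (by omega)]
        · have hnone : D[a]? = none := hpost1 a h1 (by omega)
          have hG : pvG F a = 3602 := (hcorr a).2 hnone
          have hGd : F.getD a 3602 = 3602 := hG
          simp only [pvBScan, hGd]
          rw [if_neg (by omega)]
          exact ih (a + 1) (by omega) (by omega) (by omega)

-- ---------- initial states ----------
theorem pvInit_lookup (x : Int) :
    ((∅ : Std.HashMap Int Int).insert 0 0)[x]? = if (0 : Int) = x then some 0 else none := by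
  simp only [Std.HashMap.getElem?_insert, beq_iff_eq]
  by_cases h : (0 : Int) = x <;> simp [h]

theorem pvQInv_init (buttons : List Int) :
    pvQInv buttons ((∅ : Std.HashMap Int Int).insert 0 0) [0] {0} := by
  refine ⟨?_, ?_, ?_, ?_, ?_, ?_, ?_, ?_⟩
  · intro x
    rw [pvInit_lookup]
    by_cases h : (0 : Int) = x
    · subst h
      simp
    · rw [if_neg h]
      constructor
      · intro hc; simp at hc
      · intro hc
        simp only [Finset.mem_singleton] at hc
        exact absurd hc.symm h
  · intro x hx
    simp only [Finset.mem_singleton] at hx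
    simp [hx, Finset.mem_Icc]
  · intro x d hx
    rw [pvInit_lookup] at hx
    by_cases h : (0 : Int) = x
    · rw [if_pos h] at hx
      injection hx with hx'
      subst hx'
      refine ⟨le_refl 0, by simp, ?_⟩
      rw [← h]
      exact pvReach.zero
    · rw [if_neg h] at hx; cases hx
  · intro u hu
    simp only [List.mem_singleton] at hu
    subst hu
    rw [pvInit_lookup]
    simp
  · exact List.nodup_singleton 0
  · simp
  · intro u' hu' x d hx
    simp only [List.mem_singleton] at hu'
    subst hu'
    rw [pvInit_lookup] at hx ⊢
    by_cases h : (0 : Int) = x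
    · rw [if_pos h] at hx
      injection hx with hx'
      subst hx'
      simp
    · rw [if_neg h] at hx; cases hx
  · intro x d hx hxq
    rw [pvInit_lookup] at hx
    by_cases h : (0 : Int) = x
    · exact absurd (by simp [← h]) hxq
    · rw [if_neg h] at hx; cases hx

theorem pvFInv_init (buttons : List Int) :
    pvFInv buttons ((∅ : Std.HashMap Int Int).insert 0 0) := by
  constructor
  · intro x d hx
    rw [pvInit_lookup] at hx
    by_cases h : (0 : Int) = x
    · rw [if_pos h] at hx
      injection hx with hx'
      subst hx'
      refine ⟨le_refl 0, by omega, by omega, by omega, ?_⟩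
      rw [← h]
      exact pvReach.zero
    · rw [if_neg h] at hx; cases hx
  · rw [pvInit_lookup]; simp

theorem pvPhi_init : pvPhi ((∅ : Std.HashMap Int Int).insert 0 0) < 12970803 := by
  have hb : ∀ i ∈ Finset.range 3601,
      (pvG ((∅ : Std.HashMap Int Int).insert 0 0) (i : Int)).toNat ≤ 3602 := by
    intro i _
    cases hx : ((∅ : Std.HashMap Int Int).insert 0 0)[(i : Int)]? with
    | some d =>
        rw [pvInit_lookup] at hx
        by_cases h : (0 : Int) = (i : Int)
        · rw [if_pos h] at hx
          injection hx with hx'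
          rw [pvG_some _ _ _ (by rw [pvInit_lookup, if_pos h])]
          omega
        · rw [if_neg h] at hx; cases hx
    | none => rw [pvG_none _ _ hx]; omega
  have := Finset.sum_le_sum hb
  rw [Finset.sum_const, Finset.card_range] at this
  have h2 : pvPhi ((∅ : Std.HashMap Int Int).insert 0 0) ≤ 3601 * 3602 := by
    simpa [pvPhi] using this
  omega

-- ===== VERDICT (by name: the statement is the Claim_ definition above) =====
theorem suboptimalBFS_spec : Claim_equal_suboptimalBFS := by
  unfold Claim_equal_suboptimalBFS
  intro n t buttons hdom hpre
  unfold Spec_suboptimalBFS suboptimalBFS suboptimalBFS_alt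
  obtain ⟨hFinv, hFfix⟩ := pvRelaxLoop_post buttons 12970803
    ((∅ : Std.HashMap Int Int).insert 0 0) true (pvFInv_init buttons) pvPhi_init
  set F := pvRelaxLoop buttons 12970803 ((∅ : Std.HashMap Int Int).insert 0 0) true with hF
  by_cases ht0 : t = 0
  · subst ht0
    rw [if_pos rfl]
    have hG0 : F.getD 0 3602 = 0 := pvG_some F 0 0 hFinv.2
    rw [show max (0 : Int) 0 = 0 from rfl, PySem.List.pyRange_one_cons (by norm_num)]
    simp [pvBScan, hG0]
  · have ht : 1 ≤ t := by
      unfold Pre_suboptimalBFS at hpre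
      omega
    rw [if_neg ht0]
    have hinit : pvInv t ((∅ : Std.HashMap Int Bool).insert 0 true) [(0, 0)] 0 3601
        ((∅ : Std.HashMap Int Int).insert 0 0) [0] := by
      refine ⟨?_, ?_, ?_, ?_, ?_⟩
      · intro x
        by_cases hx : (0 : Int) = x
        · simp [hx]
        · simp [Std.HashMap.getD_insert, hx]
      · simp
      · simp
      · intro s hs1 hs2
        have hs0 : (0 : Int) ≠ s := by omega
        simp [hs0]
      · left; exact ⟨rfl, rfl⟩
    have hpost := pvLoop_post t buttons 5000 _ _ _ _ _ _ hinit
    have hQpost := pvQLoop_post buttons 5000 ((∅ : Std.HashMap Int Int).insert 0 0) [0] {0}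
      (pvQInv_init buttons) (by simp)
    have hD0 : (pvQLoop buttons 5000 ((∅ : Std.HashMap Int Int).insert 0 0) [0])[(0 : Int)]? =
        some 0 := pvQLoop_mono buttons 5000 _ [0] 0 0 (by simp)
    set D := pvQLoop buttons 5000 ((∅ : Std.HashMap Int Int).insert 0 0) [0] with hD
    have hcorr := pvCorr buttons D F hD0 hQpost hFinv hFfix
    have hsound : ∀ x d : Int, D[x]? = some d → d ≤ 3600 :=
      fun x d h => (hQpost.1 x d h).2.1
    have hmax : max t 0 = t := by omega
    rw [hmax]
    set r := pvALoop t buttons 5000 ((∅ : Std.HashMap Int Bool).insert 0 true) [(0, 0)] 0 3601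
      with hr
    by_cases ht36 : t ≤ 3601
    · have hlt_lb : t ≤ r.2 := by
        rcases hpost.2 with ⟨e1, e2⟩ | ⟨r1, r2, r3⟩
        · omega
        · exact r1
      have hs := pvScan_eq buttons t r.1 r.2 F D ht hpost.1 hpost.2 hcorr hsound
        (3601 - t).toNat t le_rfl hlt_lb (by omega)
      rw [hs]
    · rw [PySem.List.pyRange_one_eq_nil (by omega)]
      rcases hpost.2 with ⟨e1, e2⟩ | ⟨r1, r2, r3⟩
      · show (r.1, r.2 - t) = (0, 3601 - t)
        rw [e1, e2]
      · omega
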